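-- pv_equiv track=rewrite | github.com/dyonak/FuseMobsList | find_mob.py | find_mob
-- ===== SOURCE A (Python) =====
-- def find_mob(mobs_data, search_term):
--     """
--     Finds a mob's canonical name and its data by a given search term.
--
--     This function performs a case-insensitive search against both the mob's
--     main name and its list of synonyms.
--
--     Args:
--         mobs_data (dict): The dictionary of mobs loaded from the JSON file.
--         search_term (str): The name or synonym to search for.
--
--     Returns:
--         tuple: A tuple containing the mob's canonical name (str) and its
--                data (dict) if a match is found, otherwise (None, None).
--     """
--     # Use a lowercase search term for case-insensitive matching.
--     term_lower = search_term.lower()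
--
--     # Iterate through each mob in the dictionary.
--     for mob_name, mob_info in mobs_data.items():
--         # 1. Check if the search term matches the mob's main name.
--         if term_lower == mob_name.lower():
--             return mob_name, mob_info
--
--         # 2. Check if the search term exists in the mob's synonyms list.
--         # We convert each synonym to lowercase to ensure the match is case-insensitive.
--         synonyms_lower = [s.lower() for s in mob_info.get("synonyms", [])]
--         if term_lower in synonyms_lower:
--             return mob_name, mob_info
--
--     # If the loop completes without finding a match, return None.
--     return None, None
-- ===== SOURCE B (Python) =====
-- def find_mob(mobs_data, search_term):
--     # Build a lowercase index once (first occurrence wins), then do one lookup.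
--     index = {}
--     for mob_name, mob_info in mobs_data.items():
--         entry = (mob_name, mob_info)
--         index.setdefault(mob_name.lower(), entry)
--         for s in mob_info.get("synonyms", []):
--             index.setdefault(s.lower(), entry)
--     return index.get(search_term.lower(), (None, None))
-- ===== Notes on version B (the rewrite author's own statement) =====
-- stated objective: alternative
-- what changed: Replaces the scan-with-early-return over mobs by building a lowercased-key index dict once with setdefault (first occurrence wins, names registered before synonyms) and then doing a single dict lookup with a (None, None) default.
import Mathlib
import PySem

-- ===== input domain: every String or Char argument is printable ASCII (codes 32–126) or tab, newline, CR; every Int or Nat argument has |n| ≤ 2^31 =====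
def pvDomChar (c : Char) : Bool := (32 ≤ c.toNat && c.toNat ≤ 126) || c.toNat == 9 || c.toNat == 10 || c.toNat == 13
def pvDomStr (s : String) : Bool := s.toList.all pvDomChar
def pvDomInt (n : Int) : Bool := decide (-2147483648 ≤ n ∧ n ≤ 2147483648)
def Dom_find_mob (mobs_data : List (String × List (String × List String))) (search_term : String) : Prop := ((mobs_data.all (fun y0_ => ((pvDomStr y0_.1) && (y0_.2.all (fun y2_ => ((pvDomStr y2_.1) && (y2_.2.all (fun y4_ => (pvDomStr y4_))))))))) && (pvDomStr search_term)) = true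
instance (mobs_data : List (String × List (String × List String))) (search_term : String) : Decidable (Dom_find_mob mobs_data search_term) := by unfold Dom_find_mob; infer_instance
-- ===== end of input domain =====

-- B builds a lowercased-key index with setdefault (first wins) and does one lookup, instead of A's scan with early return; return values proved equal on all inputs.


-- ===== PORT A =====
-- scan the mobs in order; first name/synonym match (case-insensitive) returns early
def find_mob_go (term_lower : String) :
    List (String × List (String × List String)) → Option String × (Option (List (String × List String)))
  | [] => (none, none)
  | (mob_name, mob_info) :: rest =>
    if term_lower = PySem.Str.lower mob_name then (some mob_name, some mob_info)
    else
      let synonyms_lower := ((PySem.Dict.mk mob_info).getD "synonyms" []).map PySem.Str.lower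
      if synonyms_lower.contains term_lower then (some mob_name, some mob_info)
      else find_mob_go term_lower rest

def find_mob (mobs_data : List (String × List (String × List String))) (search_term : String) : Option String × (Option (List (String × List String))) :=
  find_mob_go (PySem.Str.lower search_term) mobs_data

-- ===== PORT B =====
-- one mob's contribution to the index: setdefault its lowered name, then each lowered synonym
def find_mob_step
    (d : PySem.Dict String (Option String × Option (List (String × List String))))
    (p : String × List (String × List String)) :
    PySem.Dict String (Option String × Option (List (String × List String))) :=
  let entry := (some p.1, some p.2)
  let d1 := d.setdefault (PySem.Str.lower p.1) entry
  ((PySem.Dict.mk p.2).getD "synonyms" []).foldl (fun d2 s => d2.setdefault (PySem.Str.lower s) entry) d1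

def find_mob_alt (mobs_data : List (String × List (String × List String))) (search_term : String) : Option String × (Option (List (String × List String))) :=
  let index := mobs_data.foldl find_mob_step PySem.Dict.empty
  index.getD (PySem.Str.lower search_term) (none, none)

-- ===== PRECONDITION & SPEC =====
def Spec_find_mob (mobs_data : List (String × List (String × List String))) (search_term : String) (out : Option String × (Option (List (String × List String)))) : Prop := out = find_mob_alt mobs_data search_term
instance (mobs_data : List (String × List (String × List String))) (search_term : String) (out : Option String × (Option (List (String × List String)))) : Decidable (Spec_find_mob mobs_data search_term out) := by unfold Spec_find_mob; infer_instance

-- ===== CLAIM (what is proved, stated in full; the proofs are below) =====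
def Claim_equal_find_mob : Prop := ∀ (mobs_data : List (String × List (String × List String))) (search_term : String), Dom_find_mob mobs_data search_term → Spec_find_mob mobs_data search_term (find_mob mobs_data search_term)

-- ===== LEMMAS AND PROOFS =====

-- what one mob contributes for a fixed key
def find_mob_hit (p : String × List (String × List String)) (k : String) :
    Option (Option String × Option (List (String × List String))) :=
  if k = PySem.Str.lower p.1 ∨
     ((((PySem.Dict.mk p.2).getD "synonyms" []).map PySem.Str.lower).contains k = true)
  then some (some p.1, some p.2) else none

theorem get?_setdefault_or {ν : Type}
    (d : PySem.Dict String ν) (k' k : String) (v : ν) :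
    (d.setdefault k' v).get? k = (d.get? k).or (if k = k' then some v else none) := by
  by_cases h : k = k'
  · subst h
    rw [PySem.Dict.get?_setdefault_self]
    cases d.get? k <;> simp
  · rw [PySem.Dict.get?_setdefault_of_ne d v h]
    simp [h]

theorem get?_syn_fold {ν : Type} (v : ν) (k : String) :
    ∀ (syns : List String) (d : PySem.Dict String ν),
    ((syns.foldl (fun d2 s => d2.setdefault (PySem.Str.lower s) v) d).get? k)
      = (d.get? k).or (if ((syns.map PySem.Str.lower).contains k) = true then some v else none) := by
  intro syns
  induction syns with
  | nil => intro d; simp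
  | cons s t ih =>
    intro d
    simp only [List.foldl_cons, ih, get?_setdefault_or, List.map_cons, List.contains_cons]
    by_cases h : k = PySem.Str.lower s
    · simp [h]
    · simp [h]

theorem get?_step (d : PySem.Dict String (Option String × Option (List (String × List String))))
    (p : String × List (String × List String)) (k : String) :
    (find_mob_step d p).get? k = (d.get? k).or (find_mob_hit p k) := by
  unfold find_mob_step find_mob_hit
  rw [get?_syn_fold, get?_setdefault_or, Option.or_assoc]
  by_cases h1 : k = PySem.Str.lower p.1
  · simp [h1]
  · by_cases h2 : ((((PySem.Dict.mk p.2).getD "synonyms" []).map PySem.Str.lower).contains k) = true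
    · simp [h1]
    · simp [h1]

theorem foldl_or_pull {α β : Type} (f : β → Option α) (l : List β) (o : Option α) :
    l.foldl (fun a x => a.or (f x)) o = o.or (l.foldl (fun a x => a.or (f x)) none) := by
  induction l generalizing o with
  | nil => simp
  | cons x t ih =>
    simp only [List.foldl_cons, Option.none_or]
    rw [ih, ih (f x), Option.or_assoc]

theorem get?_fold_index (k : String) :
    ∀ (mobs : List (String × List (String × List String)))
      (d : PySem.Dict String (Option String × Option (List (String × List String)))),
    ((mobs.foldl find_mob_step d).get? k)
      = (d.get? k).or ((mobs.foldl (fun a p => a.or (find_mob_hit p k)) none)) := by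
  intro mobs
  induction mobs with
  | nil => intro d; simp
  | cons p t ih =>
    intro d
    simp only [List.foldl_cons, ih, get?_step, Option.none_or]
    rw [foldl_or_pull _ t (find_mob_hit p k), Option.or_assoc]

theorem find_mob_go_eq_hits (k : String) :
    ∀ (mobs : List (String × List (String × List String))),
    find_mob_go k mobs
      = ((mobs.foldl (fun a p => a.or (find_mob_hit p k)) none)).getD (none, none) := by
  intro mobs
  induction mobs with
  | nil => simp [find_mob_go]
  | cons p t ih =>
    simp only [List.foldl_cons, Option.none_or]
    rw [foldl_or_pull _ t (find_mob_hit p k)]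
    by_cases h1 : k = PySem.Str.lower p.1
    · simp [find_mob_go, find_mob_hit, h1]
    · by_cases h2 : ∃ a ∈ (PySem.Dict.mk p.2).getD "synonyms" [], PySem.Str.lower a = k
      · simp [find_mob_go, find_mob_hit, h1, h2]
      · simp [find_mob_go, find_mob_hit, h1, h2, ih]

-- ===== VERDICT (by name: the statement is the Claim_ definition above) =====
theorem find_mob_spec : Claim_equal_find_mob := by
  intro mobs_data search_term _
  unfold Spec_find_mob find_mob find_mob_alt
  rw [find_mob_go_eq_hits, PySem.Dict.getD_eq_get?_getD, get?_fold_index]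
  simp
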